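-- pv_equiv track=rewrite | github.com/NUSTM/COQE | Baseline_Systems/crf_utils/evaluate_test_file.py | token_label_convert_to_char_label
-- ===== SOURCE A (Python) =====
-- def token_label_convert_to_char_label(sequence_token, sequence_label):
--     sentence = "".join(sequence_token)
--     char_level_sequence_label = ["O"] * len(sentence)
--
--     token_index, char_index = 0, 0
--     while token_index < len(sequence_token) and char_index < len(sentence):
--         if sequence_label[token_index] == "O":
--             char_index = char_index + len(sequence_token[token_index])
--             token_index = token_index + 1
--             continue
--
--         for t in range(len(sequence_token[token_index])):
--             if sequence_label[token_index] == "S":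
--                 if len(sequence_token[token_index]) == 1:
--                     char_level_sequence_label[char_index + t] = "S"
--                 else:
--                     if t == 0:
--                         char_level_sequence_label[char_index + t] = "B"
--                     elif t == len(sequence_token[token_index]) - 1:
--                         char_level_sequence_label[char_index + t] = "E"
--                     else:
--                         char_level_sequence_label[char_index + t] = "M"
--
--             elif sequence_label[token_index] == "B":
--                 char_level_sequence_label[char_index + t] = "B" if t == 0 else "M"
--
--             elif sequence_label[token_index] == "M":
--                 char_level_sequence_label[char_index + t] = "M"
--
--             else:
--                 char_level_sequence_label[char_index + t] = "E" if t == len(sequence_token[token_index]) - 1 else "M"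
--
--         char_index = char_index + len(sequence_token[token_index])
--         token_index = token_index + 1
--
--     assert char_index == len(sentence) and token_index == len(sequence_token), "[ERROR] function error"
--
--     # check_convert_correct(sequence_token, sequence_label, char_level_sequence_label)
--     return char_level_sequence_label
-- ===== SOURCE B (Python) =====
-- def token_label_convert_to_char_label(sequence_token, sequence_label):
--     result = []
--     for i, token in enumerate(sequence_token):
--         label = sequence_label[i]
--         n = len(token)
--         if n == 0:
--             continue  # empty token contributes no characters
--         if label == "O":
--             block = ["O"] * n
--         elif label == "S":
--             block = ["S"] if n == 1 else ["B"] + ["M"] * (n - 2) + ["E"]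
--         elif label == "B":
--             block = ["B"] + ["M"] * (n - 1)
--         elif label == "M":
--             block = ["M"] * n
--         else:
--             block = ["M"] * (n - 1) + ["E"]
--         result.extend(block)
--     return result
-- ===== Notes on version B (the rewrite author's own statement) =====
-- stated objective: simpler
-- what changed: B emits one closed-form label block per token (built with list repetition) and concatenates them, instead of preallocating an 'O' array and overwriting it element by element with nested index arithmetic in a while loop.
import Mathlib
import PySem

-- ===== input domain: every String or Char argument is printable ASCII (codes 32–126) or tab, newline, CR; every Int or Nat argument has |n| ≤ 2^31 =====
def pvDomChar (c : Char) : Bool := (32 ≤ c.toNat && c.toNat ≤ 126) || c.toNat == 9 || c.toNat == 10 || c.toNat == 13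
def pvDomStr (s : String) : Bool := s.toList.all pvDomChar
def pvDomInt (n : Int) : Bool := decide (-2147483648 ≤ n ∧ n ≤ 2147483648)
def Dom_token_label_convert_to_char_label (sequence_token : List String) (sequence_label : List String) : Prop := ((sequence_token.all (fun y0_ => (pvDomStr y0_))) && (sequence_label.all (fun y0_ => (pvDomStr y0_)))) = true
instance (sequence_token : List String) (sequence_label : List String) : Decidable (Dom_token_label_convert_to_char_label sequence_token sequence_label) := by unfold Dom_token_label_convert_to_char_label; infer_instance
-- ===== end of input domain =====

-- B builds the char-level labels by concatenating one closed-form block per token instead of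
-- overwriting a preallocated 'O' array through index arithmetic in a while loop (objective: simpler; same cost).

-- ===== PORT A =====
-- value A's inner for-body writes at char_level[char_index + t] (same nested branch order as the Python)
def tlcA_val (lab : String) (n : Nat) (t : Nat) : String :=
  if lab == "S" then
    if n == 1 then "S"
    else if t == 0 then "B"
    else if t == n - 1 then "E"
    else "M"
  else if lab == "B" then (if t == 0 then "B" else "M")
  else if lab == "M" then "M"
  else (if t == n - 1 then "E" else "M")

-- 'for t in range(len(sequence_token[token_index])): char_level[char_index + t] = …'
def tlcA_forPass (lab : String) (n : Nat) (char_index : Nat) (arr : List String) : List String :=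
  (List.range n).foldl (fun a t => a.set (char_index + t) (tlcA_val lab n t)) arr

-- the while loop; sequence_label[token_index] raises IndexError outside Pre_, where the default is never read
def tlcA_loop (sequence_token sequence_label : List String) (sentLen : Nat)
    (token_index char_index : Nat) (arr : List String) : List String :=
  if token_index < sequence_token.length ∧ char_index < sentLen then
    let tok := sequence_token.getD token_index ""
    let lab := sequence_label.getD token_index ""
    if lab == "O" then
      tlcA_loop sequence_token sequence_label sentLen (token_index + 1) (char_index + tok.toList.length) arr
    else
      tlcA_loop sequence_token sequence_label sentLen (token_index + 1) (char_index + tok.toList.length)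
        (tlcA_forPass lab tok.toList.length char_index arr)
  else arr
termination_by sequence_token.length - token_index

-- the final assert raises exactly outside Pre_; inside Pre_ it holds, so the port returns the array
def token_label_convert_to_char_label (sequence_token : List String) (sequence_label : List String) : List String :=
  let sentence := PySem.Str.join "" sequence_token
  let arr := List.replicate sentence.toList.length "O"
  tlcA_loop sequence_token sequence_label sentence.toList.length 0 0 arr

-- ===== PORT B =====
-- the closed-form label block of one token of length n
def tlcB_block (label : String) (n : Nat) : List String :=
  if n == 0 then []
  else if label == "O" then List.replicate n "O"
  else if label == "S" then (if n == 1 then ["S"] else ["B"] ++ List.replicate (n - 2) "M" ++ ["E"])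
  else if label == "B" then ["B"] ++ List.replicate (n - 1) "M"
  else if label == "M" then List.replicate n "M"
  else List.replicate (n - 1) "M" ++ ["E"]

def token_label_convert_to_char_label_alt (sequence_token : List String) (sequence_label : List String) : List String :=
  (PySem.List.enumerate sequence_token).foldl
    (fun res p => res ++ tlcB_block (PySem.List.pyGetD sequence_label p.1 "") p.2.toList.length) []

-- ===== PRECONDITION & SPEC =====
-- Pre_ excludes exactly the inputs on which A raises: an IndexError when sequence_label runs out
-- before the tokens do, and the AssertionError triggered by the early exit when the token list is
-- nonempty and ends with an empty-string token.
def Pre_token_label_convert_to_char_label (sequence_token : List String) (sequence_label : List String) : Prop :=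
  sequence_token = [] ∨
    (sequence_token.getLast? ≠ some "" ∧ sequence_token.length ≤ sequence_label.length)
instance (sequence_token : List String) (sequence_label : List String) : Decidable (Pre_token_label_convert_to_char_label sequence_token sequence_label) := by unfold Pre_token_label_convert_to_char_label; infer_instance
def pvWitness_token_label_convert_to_char_label : List String × List String := (["ab", "c", "de"], ["B", "M", "E"])

def Spec_token_label_convert_to_char_label (sequence_token : List String) (sequence_label : List String) (out : List String) : Prop := out = token_label_convert_to_char_label_alt sequence_token sequence_label
instance (sequence_token : List String) (sequence_label : List String) (out : List String) : Decidable (Spec_token_label_convert_to_char_label sequence_token sequence_label out) := by unfold Spec_token_label_convert_to_char_label; infer_instance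

-- ===== CLAIM (what is proved, stated in full; the proofs are below) =====
def Claim_equal_token_label_convert_to_char_label : Prop := ∀ (sequence_token : List String) (sequence_label : List String), Dom_token_label_convert_to_char_label sequence_token sequence_label → Pre_token_label_convert_to_char_label sequence_token sequence_label → Spec_token_label_convert_to_char_label sequence_token sequence_label (token_label_convert_to_char_label sequence_token sequence_label)

-- ===== LEMMAS AND PROOFS =====

-- total length of the first ti tokens
def tlcS (st : List String) (ti : Nat) : Nat :=
  ((st.take ti).map (fun s => s.toList.length)).sum

-- B's output restricted to the first ti tokens
def tlcP (st sl : List String) (ti : Nat) : List String :=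
  ((PySem.List.enumerate st).take ti).flatMap
    (fun p => tlcB_block (PySem.List.pyGetD sl p.1 "") p.2.toList.length)

theorem tlc_len_join (st : List String) :
    (PySem.Str.join "" st).toList.length = tlcS st st.length := by
  have h : ∀ L : List (List Char), List.intercalate ([] : List Char) L = L.flatten := by
    intro L
    induction L with
    | nil => simp [List.intercalate]
    | cons a l ih =>
      cases l with
      | nil => simp [List.intercalate]
      | cons b m => simp_all [List.intercalate, List.intersperse]
  simp [pysem, PySem.Chars.join, h, tlcS, Function.comp_def]

theorem tlcS_mono (st : List String) (a b : Nat) (hab : a ≤ b) : tlcS st a ≤ tlcS st b := by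
  have h1 : st.take a = (st.take b).take a := by rw [List.take_take, Nat.min_eq_left hab]
  have h2 : (st.take b).take a ++ (st.take b).drop a = st.take b := List.take_append_drop a _
  unfold tlcS
  rw [← h2, ← h1, List.map_append, List.sum_append]
  omega

theorem tlcS_succ (st : List String) (ti : Nat) (h : ti < st.length) :
    tlcS st (ti + 1) = tlcS st ti + st[ti].toList.length := by
  unfold tlcS
  rw [show st.take (ti + 1) = st.take ti ++ [st[ti]] by
    rw [List.take_add_one, List.getElem?_eq_getElem h]; rfl]
  rw [List.map_append, List.sum_append]
  rfl

theorem tlcS_lt (st : List String) (ti : Nat) (hti : ti < st.length)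
    (hlast : st.getLast? ≠ some "") :
    tlcS st ti < tlcS st st.length := by
  have hne : st ≠ [] := by rintro rfl; simp at hti
  have hn1 : st.length - 1 < st.length := by have := List.length_pos_iff.mpr hne; omega
  have hlastEq : st.getLast? = some st[st.length - 1] := by
    rw [List.getLast?_eq_getElem?, List.getElem?_eq_getElem hn1]
  have hpos : 0 < st[st.length - 1].toList.length := by
    rcases Nat.eq_zero_or_pos st[st.length - 1].toList.length with h0 | h0
    · exfalso
      apply hlast
      rw [hlastEq]
      congr 1
      exact String.toList_eq_nil_iff.mp (List.length_eq_zero_iff.mp h0)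
    · exact h0
  have h1 : tlcS st ti ≤ tlcS st (st.length - 1) := tlcS_mono st ti (st.length - 1) (by omega)
  have h2 : tlcS st (st.length - 1 + 1) = tlcS st (st.length - 1) + st[st.length - 1].toList.length :=
    tlcS_succ st _ hn1
  have h3 : st.length - 1 + 1 = st.length := by omega
  rw [h3] at h2
  omega

theorem tlcB_block_length (lab : String) (n : Nat) : (tlcB_block lab n).length = n := by
  unfold tlcB_block
  split_ifs with h1 h2 h3 h4 h5 h6 <;> simp_all <;> omega

theorem tlc_range_mid (m : Nat) (e mch : String) :
    (List.range (m + 1)).map (fun t => if t == m then e else mch) = List.replicate m mch ++ [e] := by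
  rw [List.range_succ, List.map_append]
  congr 1
  · rw [List.eq_replicate_iff]
    constructor
    · simp
    · intro b hb
      simp only [List.mem_map, List.mem_range] at hb
      obtain ⟨t, ht, rfl⟩ := hb
      simp [Nat.ne_of_lt ht]
  · simp

theorem tlc_map_range_val (lab : String) (n : Nat) (h : ¬ lab == "O") :
    (List.range n).map (tlcA_val lab n) = tlcB_block lab n := by
  by_cases hS : lab == "S"
  · rw [beq_iff_eq] at hS
    subst hS
    match n with
    | 0 => rfl
    | 1 => rfl
    | m + 2 =>
      rw [List.range_succ_eq_map, List.map_cons, List.map_map]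
      have h1 : (fun t => (tlcA_val "S" (m + 2) ∘ (· + 1)) t) = (fun t => if t == m then "E" else "M") := by
        funext t
        by_cases htm : t = m <;> simp [tlcA_val, htm]
      rw [show (tlcA_val "S" (m + 2) ∘ (· + 1)) = (fun t => if t == m then "E" else "M") from h1]
      rw [tlc_range_mid]
      simp [tlcA_val, tlcB_block]
  · by_cases hB : lab == "B"
    · rw [beq_iff_eq] at hB
      subst hB
      match n with
      | 0 => rfl
      | m + 1 =>
        rw [List.range_succ_eq_map, List.map_cons, List.map_map]
        have h1 : (tlcA_val "B" (m + 1) ∘ (· + 1)) = (fun _ => "M") := by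
          funext t; simp [tlcA_val]
        rw [h1]
        simp [tlcA_val, tlcB_block, List.map_const']
    · by_cases hM : lab == "M"
      · rw [beq_iff_eq] at hM
        subst hM
        have h1 : tlcA_val "M" n = (fun _ => "M") := by funext t; simp [tlcA_val]
        rw [h1, List.map_const']
        unfold tlcB_block
        split_ifs with h0 <;> simp_all
      · match n with
        | 0 => rfl
        | m + 1 =>
          have h1 : tlcA_val lab (m + 1) = (fun t => if t == m then "E" else "M") := by
            funext t
            by_cases htm : t = m <;> simp [tlcA_val, htm, hS, hB, hM]
          rw [h1, tlc_range_mid]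
          unfold tlcB_block
          simp_all

theorem tlcP_length (st sl : List String) (ti : Nat) :
    (tlcP st sl ti).length = tlcS st ti := by
  unfold tlcP tlcS
  rw [List.length_flatMap]
  have h1 : ∀ p : Int × String,
      (tlcB_block (PySem.List.pyGetD sl p.1 "") p.2.toList.length).length = p.2.toList.length := by
    intro p; exact tlcB_block_length _ _
  rw [List.map_congr_left (fun p _ => h1 p)]
  have h2 : ((PySem.List.enumerate st).take ti).map (fun p => p.2.toList.length)
      = (st.take ti).map (fun s => s.toList.length) := by
    have : ((PySem.List.enumerate st).take ti).map (fun p => p.2.toList.length)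
        = (((PySem.List.enumerate st).take ti).map (·.2)).map (fun s => s.toList.length) := by
      rw [List.map_map]; rfl
    rw [this, List.map_take, PySem.List.map_snd_enumerate]
  rw [h2]

theorem tlc_foldSet (f : Nat → String) (n k : Nat) (p : List String) (h : n ≤ k) :
    (List.range n).foldl (fun a t => a.set (p.length + t) (f t)) (p ++ List.replicate k "O")
      = p ++ (List.range n).map f ++ List.replicate (k - n) "O" := by
  induction n with
  | zero => simp
  | succ m ih =>
    rw [List.range_succ, List.foldl_append, ih (by omega)]
    rw [List.map_append, List.foldl_cons, List.foldl_nil]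
    rw [List.append_assoc, List.set_append]
    have hlen : ¬ p.length + m < p.length := by omega
    rw [if_neg hlen]
    have h2 : p.length + m - p.length = m := by omega
    rw [h2, List.set_append]
    have h3 : (List.map f (List.range m)).length = m := by simp
    rw [if_neg (by omega : ¬ m < (List.map f (List.range m)).length)]
    rw [h3, Nat.sub_self]
    have h4 : List.replicate (k - m) "O" = "O" :: List.replicate (k - (m + 1)) "O" := by
      rw [show k - m = (k - (m + 1)) + 1 by omega, List.replicate_succ]
    rw [h4, List.set_cons_zero]
    simp

theorem tlcP_succ (st sl : List String) (ti : Nat) (h : ti < st.length) :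
    tlcP st sl (ti + 1) = tlcP st sl ti ++ tlcB_block (sl.getD ti "") st[ti].toList.length := by
  unfold tlcP
  rw [List.take_add_one]
  have h1 : (PySem.List.enumerate st)[ti]? = some ((ti : Int), st[ti]) := by
    rw [PySem.List.getElem?_enumerate, List.getElem?_eq_getElem h]
    simp
  rw [h1]
  simp [PySem.List.pyGetD_natCast]

theorem tlc_loop_inv (st sl : List String) (hlast : st.getLast? ≠ some "")
    (hlen : st.length ≤ sl.length) (k ti : Nat) (hti : ti ≤ st.length) (hk : st.length - ti = k) :
    tlcA_loop st sl (tlcS st st.length) ti (tlcS st ti)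
        (tlcP st sl ti ++ List.replicate (tlcS st st.length - tlcS st ti) "O")
      = tlcP st sl st.length := by
  induction k generalizing ti with
  | zero =>
    have : ti = st.length := by omega
    subst this
    rw [tlcA_loop]
    simp
  | succ k ih =>
    have hlt : ti < st.length := by omega
    have hSlt : tlcS st ti < tlcS st st.length := tlcS_lt st ti hlt hlast
    have hSsucc : tlcS st (ti + 1) = tlcS st ti + st[ti].toList.length := tlcS_succ st ti hlt
    have hSle : tlcS st (ti + 1) ≤ tlcS st st.length := tlcS_mono st (ti + 1) st.length (by omega)
    have htok : st.getD ti "" = st[ti] := List.getD_eq_getElem st "" hlt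
    have hlab : sl.getD ti "" = sl[ti] := List.getD_eq_getElem sl "" (by omega)
    have hsplit : List.replicate (tlcS st st.length - tlcS st ti) "O"
        = List.replicate st[ti].toList.length "O" ++ List.replicate (tlcS st st.length - tlcS st (ti + 1)) "O" := by
      rw [← List.replicate_add]
      congr 1
      omega
    rw [tlcA_loop, if_pos ⟨hlt, hSlt⟩]
    simp only [htok, hlab]
    by_cases hO : sl[ti] == "O"
    · rw [if_pos hO]
      have hblock : tlcB_block (sl.getD ti "") st[ti].toList.length = List.replicate st[ti].toList.length "O" := by
        rw [hlab, beq_iff_eq.mp hO]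
        unfold tlcB_block
        split_ifs with h0 <;> simp_all
      have harr : tlcP st sl ti ++ List.replicate (tlcS st st.length - tlcS st ti) "O"
          = tlcP st sl (ti + 1) ++ List.replicate (tlcS st st.length - tlcS st (ti + 1)) "O" := by
        rw [tlcP_succ st sl ti hlt, hblock, hsplit, List.append_assoc]
      rw [harr, ← hSsucc]
      exact ih (ti + 1) (by omega) (by omega)
    · rw [if_neg hO]
      have hwrite : tlcA_forPass (sl[ti]) st[ti].toList.length (tlcS st ti)
            (tlcP st sl ti ++ List.replicate (tlcS st st.length - tlcS st ti) "O")
          = tlcP st sl (ti + 1) ++ List.replicate (tlcS st st.length - tlcS st (ti + 1)) "O" := by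
        have hfold := tlc_foldSet (tlcA_val (sl[ti]) st[ti].toList.length) st[ti].toList.length
            (tlcS st st.length - tlcS st ti) (tlcP st sl ti) (by omega)
        rw [tlcP_length] at hfold
        unfold tlcA_forPass
        rw [hfold, tlc_map_range_val _ _ hO]
        rw [tlcP_succ st sl ti hlt, hlab, List.append_assoc,
          show tlcS st st.length - tlcS st ti - st[ti].toList.length
              = tlcS st st.length - tlcS st (ti + 1) by omega, ← List.append_assoc]
      rw [hwrite, ← hSsucc]
      exact ih (ti + 1) (by omega) (by omega)

theorem tlc_alt_eq (st sl : List String) :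
    token_label_convert_to_char_label_alt st sl = tlcP st sl st.length := by
  unfold token_label_convert_to_char_label_alt tlcP
  rw [PySem.List.foldl_append_eq_flatMap]
  rw [List.take_of_length_le (by rw [PySem.List.length_enumerate])]
  simp

-- ===== VERDICT (by name: the statement is the Claim_ definition above) =====
theorem token_label_convert_to_char_label_spec : Claim_equal_token_label_convert_to_char_label := by
  intro st sl _ hPre
  unfold Spec_token_label_convert_to_char_label
  have hlast : st.getLast? ≠ some "" := by
    rcases hPre with rfl | ⟨h, _⟩
    · simp
    · exact h
  have hlen : st.length ≤ sl.length := by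
    rcases hPre with rfl | ⟨_, h⟩
    · simp
    · exact h
  rw [tlc_alt_eq]
  unfold token_label_convert_to_char_label
  simp only [tlc_len_join]
  have h0 : tlcS st 0 = 0 := by simp [tlcS]
  have hP0 : tlcP st sl 0 = [] := by simp [tlcP]
  have := tlc_loop_inv st sl hlast hlen st.length 0 (by omega) (by omega)
  rw [h0, hP0] at this
  simpa using this
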